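-- pv_equiv track=rewrite | github.com/xtangxtang/gp-quant | src/downloader/get_total_daily_trade.py | _compress_missing_ranges
-- ===== SOURCE A (Python) =====
-- def _compress_missing_ranges(expected: list[str], have: set[str]) -> list[tuple[str, str]]:
--     """Compress missing expected dates into contiguous ranges (by expected list adjacency)."""
--     ranges: list[tuple[str, str]] = []
--     cur_start = None
--     cur_end = None
--     for d in expected:
--         if d in have:
--             if cur_start is not None:
--                 ranges.append((cur_start, cur_end or cur_start))
--                 cur_start = None
--                 cur_end = None
--             continue
--
--         if cur_start is None:
--             cur_start = d
--             cur_end = d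
--         else:
--             cur_end = d
--
--     if cur_start is not None:
--         ranges.append((cur_start, cur_end or cur_start))
--     return ranges
-- ===== SOURCE B (Python) =====
-- def _compress_missing_ranges(expected: list[str], have: set[str]) -> list[tuple[str, str]]:
--     """Two-pointer run scan: find each maximal run [i..j] of missing dates and
--     emit its endpoints (expected[i], expected[j])."""
--     res = []
--     i, n = 0, len(expected)
--     while i < n:
--         if expected[i] in have:
--             i += 1
--         else:
--             j = i
--             while j + 1 < n and expected[j + 1] not in have:
--                 j += 1
--             res.append((expected[i], expected[j]))
--             i = j + 1
--     return res
-- ===== Notes on version B (the rewrite author's own statement) =====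
-- stated objective: alternative
-- what changed: Replaces A's cur_start/cur_end sentinel state machine over elements with a two-pointer index scan that finds each maximal run [i..j] of missing dates and emits (expected[i], expected[j]) directly.
-- intended difference: On inputs where some maximal missing run ends in the empty string but starts with a non-empty date, A's accidental falsy check `cur_end or cur_start` replaces the run's end with its start (e.g. ('a','a')), while B returns the run's actual endpoints ('a',''), which is the intended range. — e.g. on _compress_missing_ranges(["a", ""], []): A returns [("a", "a")], B returns [("a", "")]
import Mathlib
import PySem

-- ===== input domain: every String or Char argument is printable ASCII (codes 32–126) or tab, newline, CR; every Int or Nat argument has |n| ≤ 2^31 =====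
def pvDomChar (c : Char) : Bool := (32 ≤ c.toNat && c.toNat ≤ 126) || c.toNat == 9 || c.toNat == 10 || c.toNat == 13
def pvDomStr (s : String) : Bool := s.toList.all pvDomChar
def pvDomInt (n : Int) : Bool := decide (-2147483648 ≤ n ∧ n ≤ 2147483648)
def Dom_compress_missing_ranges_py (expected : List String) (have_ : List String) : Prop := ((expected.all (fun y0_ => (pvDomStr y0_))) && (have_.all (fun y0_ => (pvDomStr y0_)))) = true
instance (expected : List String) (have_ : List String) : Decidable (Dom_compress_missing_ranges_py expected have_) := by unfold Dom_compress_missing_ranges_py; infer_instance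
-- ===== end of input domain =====

-- B replaces A's cur_start/cur_end sentinel state machine with a two-pointer index
-- scan over maximal runs of missing dates (alternative decomposition, same cost).
-- On runs ending in the empty string A's accidental `cur_end or cur_start` falsy check
-- replaces the end with the start; B returns the run's actual endpoints (see D_ below).
-- `have` arrives as the list of the set's distinct elements (PySem set convention).


-- ===== PORT A =====
-- Python truthiness of a string: "" is falsy; `e or s` for strings:
def pyOrStr (e s : String) : String := if e = "" then s else e

-- `cur_end or cur_start` where cur_end : Optional[str] (None and "" are both falsy)
def pyOrOptStr (ce : Option String) (s : String) : String :=
  match ce with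
  | some e => pyOrStr e s
  | none => s

-- one iteration of A's `for d in expected` loop over state (ranges, cur_start, cur_end)
def stepA (have_ : List String) (st : List (String × String) × Option String × Option String)
    (d : String) : List (String × String) × Option String × Option String :=
  match st with
  | (ranges, cur_start, cur_end) =>
    if have_.contains d then
      match cur_start with
      | some s => (ranges ++ [(s, pyOrOptStr cur_end s)], none, none)
      | none => (ranges, none, none)
    else
      match cur_start with
      | none => (ranges, some d, some d)
      | some _ => (ranges, cur_start, some d)

-- A's trailing `if cur_start is not None: ranges.append(...)`
def finA (st : List (String × String) × Option String × Option String) : List (String × String) :=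
  match st with
  | (ranges, some s, ce) => ranges ++ [(s, pyOrOptStr ce s)]
  | (ranges, none, _) => ranges

def compress_missing_ranges_py (expected : List String) (have_ : List String) :
    List (String × String) :=
  finA (expected.foldl (stepA have_) ([], none, none))

-- ===== PORT B =====
-- Source B's inner `while j + 1 < n and expected[j + 1] not in have: j += 1`; returns the final j
def bScan (expected : List String) (have_ : List String) (j : Nat) : Nat :=
  if h : j + 1 < expected.length ∧ ¬ have_.contains (expected.getD (j + 1) "") then
    bScan expected have_ (j + 1)
  else j
termination_by expected.length - j
decreasing_by omega

-- needed for bLoop's termination: the inner while never moves j backwards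
theorem le_bScan (expected have_ : List String) (j : Nat) : j ≤ bScan expected have_ j := by
  fun_induction bScan with
  | case1 j h ih => omega
  | case2 j _ => omega

-- Source B's outer `while i < n` loop, accumulating res (indices are in range by the loop guards,
-- so Python's expected[i]/expected[j] never raise; getD mirrors them exactly there)
def bLoop (expected : List String) (have_ : List String) (i : Nat)
    (res : List (String × String)) : List (String × String) :=
  if _h : i < expected.length then
    if have_.contains (expected.getD i "") then
      bLoop expected have_ (i + 1) res
    else
      let j := bScan expected have_ i
      bLoop expected have_ (j + 1)
        (res ++ [(expected.getD i "", expected.getD j "")])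
  else res
termination_by expected.length - i
decreasing_by
  · omega
  · have := le_bScan expected have_ i; omega

def compress_missing_ranges_py_alt (expected : List String) (have_ : List String) :
    List (String × String) :=
  bLoop expected have_ 0 []

-- ===== PRECONDITION & SPEC =====
-- On inputs where some maximal missing run ends in the empty string but starts with a
-- non-empty date, A's accidental falsy check `cur_end or cur_start` replaces the run's
-- end with its start (returning e.g. ("a","a")), while B returns the run's actual
-- endpoints ("a",""), which is the intended range.
-- "some maximal run of dates missing from have_ starts non-empty and ends with the
-- empty string" — the runs are the segments of expected split on the present dates.
def D_compress_missing_ranges_py (expected : List String) (have_ : List String) : Prop :=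
  ∃ r ∈ expected.splitOnP (fun x => have_.contains x), r.headD "" ≠ "" ∧ r.getLastD "" = ""
instance (expected : List String) (have_ : List String) : Decidable (D_compress_missing_ranges_py expected have_) := by unfold D_compress_missing_ranges_py; infer_instance

def Spec_compress_missing_ranges_py (expected : List String) (have_ : List String) (out : List (String × String)) : Prop := ¬ D_compress_missing_ranges_py expected have_ → out = compress_missing_ranges_py_alt expected have_
instance (expected : List String) (have_ : List String) (out : List (String × String)) : Decidable (Spec_compress_missing_ranges_py expected have_ out) := by unfold Spec_compress_missing_ranges_py; infer_instance

def pvDiffWitness_compress_missing_ranges_py : List String × List String := (["a", ""], [])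
def pvDiffWitnessOut_compress_missing_ranges_py : (List (String × String)) × (List (String × String)) :=
  ([("a", "a")], [("a", "")])

-- ===== CLAIM (what is proved, stated in full; the proofs are below) =====
def Claim_unchanged_compress_missing_ranges_py : Prop := ∀ (expected : List String) (have_ : List String), Dom_compress_missing_ranges_py expected have_ → Spec_compress_missing_ranges_py expected have_ (compress_missing_ranges_py expected have_)
def Claim_changed_compress_missing_ranges_py : Prop := Dom_compress_missing_ranges_py (pvDiffWitness_compress_missing_ranges_py.1) (pvDiffWitness_compress_missing_ranges_py.2) ∧ D_compress_missing_ranges_py (pvDiffWitness_compress_missing_ranges_py.1) (pvDiffWitness_compress_missing_ranges_py.2) ∧ compress_missing_ranges_py (pvDiffWitness_compress_missing_ranges_py.1) (pvDiffWitness_compress_missing_ranges_py.2) = pvDiffWitnessOut_compress_missing_ranges_py.1 ∧ compress_missing_ranges_py_alt (pvDiffWitness_compress_missing_ranges_py.1) (pvDiffWitness_compress_missing_ranges_py.2) = pvDiffWitnessOut_compress_missing_ranges_py.2 ∧ pvDiffWitnessOut_compress_missing_ranges_py.1 ≠ pvDiffWitnessOut_compress_missing_ranges_py.2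
def Claim_exact_compress_missing_ranges_py : Prop := ∀ (expected : List String) (have_ : List String), Dom_compress_missing_ranges_py expected have_ → D_compress_missing_ranges_py expected have_ → compress_missing_ranges_py expected have_ ≠ compress_missing_ranges_py_alt expected have_

-- ===== LEMMAS AND PROOFS =====

-- badRunB scans the maximal runs of dates missing from have_ and reports whether some
-- run starts with a non-empty string and ends with the empty string (= D_, proved below)
def badRunB (have_ : List String) : List String → Bool
  | [] => false
  | d :: rest =>
    if have_.contains d then badRunB have_ rest
    else
      (decide (d ≠ "") && decide ((rest.takeWhile (fun x => ¬ have_.contains x)).getLastD d = ""))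
        || badRunB have_ (rest.dropWhile (fun x => ¬ have_.contains x))
termination_by l => l.length
decreasing_by
  · simp
  · have := List.length_dropWhile_le (fun x => decide ¬ have_.contains x = true) rest
    simp at this ⊢; omega

-- characterization of A: recursion on maximal runs of missing elements, A's end rule
def runSpecA (have_ : List String) : List String → List (String × String)
  | [] => []
  | d :: rest =>
    if have_.contains d then runSpecA have_ rest
    else
      (d, pyOrStr ((rest.takeWhile (fun x => ¬ have_.contains x)).getLastD d) d) ::
        runSpecA have_ (rest.dropWhile (fun x => ¬ have_.contains x))
termination_by l => l.length
decreasing_by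
  · simp
  · have := List.length_dropWhile_le (fun x => decide ¬ have_.contains x = true) rest
    simp at this ⊢; omega

-- characterization of B: same run decomposition, the run's actual last element as end
def runSpecB (have_ : List String) : List String → List (String × String)
  | [] => []
  | d :: rest =>
    if have_.contains d then runSpecB have_ rest
    else
      (d, (rest.takeWhile (fun x => ¬ have_.contains x)).getLastD d) ::
        runSpecB have_ (rest.dropWhile (fun x => ¬ have_.contains x))
termination_by l => l.length
decreasing_by
  · simp
  · have := List.length_dropWhile_le (fun x => decide ¬ have_.contains x = true) rest
    simp at this ⊢; omega

theorem dropWhile_head_false {α : Type} (p : α → Bool) (l : List α) (x : α) (xs : List α)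
    (h : l.dropWhile p = x :: xs) : p x = false := by
  induction l with
  | nil => simp at h
  | cons a l ih =>
    rw [List.dropWhile_cons] at h
    by_cases hp : p a
    · simp [hp] at h; exact ih h
    · simp [hp] at h; rw [← h.1]; simpa using hp

theorem dropWhile_eq_drop {α : Type} (p : α → Bool) (l : List α) :
    l.dropWhile p = l.drop (l.takeWhile p).length := by
  conv_lhs => rw [← List.drop_left (l₁ := l.takeWhile p) (l₂ := l.dropWhile p),
    List.takeWhile_append_dropWhile]

-- A only appends to `ranges`; the running (cur_start, cur_end) never reads it back
theorem stepA_shift (have_ : List String) (r : List (String × String)) (cs ce : Option String) (d : String) :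
    stepA have_ (r, cs, ce) d = (r ++ (stepA have_ ([], cs, ce) d).1, (stepA have_ ([], cs, ce) d).2) := by
  cases cs <;> simp [stepA] <;> split_ifs <;> simp

theorem foldlA_shift (have_ : List String) (l : List String)
    (r : List (String × String)) (cs ce : Option String) :
    l.foldl (stepA have_) (r, cs, ce) =
      (r ++ (l.foldl (stepA have_) ([], cs, ce)).1, (l.foldl (stepA have_) ([], cs, ce)).2) := by
  induction l generalizing r cs ce with
  | nil => simp
  | cons d l ih =>
    simp only [List.foldl_cons]
    rw [stepA_shift]
    rcases hs : stepA have_ ([], cs, ce) d with ⟨r1, cs1, ce1⟩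
    simp only []
    rw [ih, ih r1 cs1 ce1]
    simp [List.append_assoc]

-- a wholly-missing prefix only moves cur_end to its last element
theorem foldlA_run (have_ : List String) (t : List String) (s e : String)
    (hmiss : ∀ x ∈ t, have_.contains x = false) :
    t.foldl (stepA have_) (([] : List (String × String)), some s, some e) =
      ([], some s, some (t.getLastD e)) := by
  induction t generalizing e with
  | nil => rfl
  | cons x t ih =>
    have hx := hmiss x (by simp)
    simp only [List.foldl_cons, stepA, hx, Bool.false_eq_true]
    simp only [List.getLastD_cons]
    exact ih x (fun y hy => hmiss y (by simp [hy]))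

theorem finA_append (r0 : List (String × String)) (x : List (String × String) × Option String × Option String) :
    finA (r0 ++ x.1, x.2) = r0 ++ finA x := by
  rcases x with ⟨r, cs, ce⟩; cases cs <;> simp [finA]

theorem runSpecA_cons_pos (have_ : List String) (d : String) (rest : List String)
    (hcd : have_.contains d = true) : runSpecA have_ (d :: rest) = runSpecA have_ rest := by
  have h' : d ∈ have_ := by simpa using hcd
  rw [runSpecA]; simp [h']

theorem runSpecA_cons_neg (have_ : List String) (d : String) (rest : List String)
    (hcd : have_.contains d = false) :
    runSpecA have_ (d :: rest) =
      (d, pyOrStr ((rest.takeWhile (fun x => ¬ have_.contains x)).getLastD d) d) ::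
        runSpecA have_ (rest.dropWhile (fun x => ¬ have_.contains x)) := by
  have h' : d ∉ have_ := by simpa using hcd
  rw [runSpecA]; simp [h']

theorem runSpecB_cons_pos (have_ : List String) (d : String) (rest : List String)
    (hcd : have_.contains d = true) : runSpecB have_ (d :: rest) = runSpecB have_ rest := by
  have h' : d ∈ have_ := by simpa using hcd
  rw [runSpecB]; simp [h']

theorem runSpecB_cons_neg (have_ : List String) (d : String) (rest : List String)
    (hcd : have_.contains d = false) :
    runSpecB have_ (d :: rest) =
      (d, (rest.takeWhile (fun x => ¬ have_.contains x)).getLastD d) ::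
        runSpecB have_ (rest.dropWhile (fun x => ¬ have_.contains x)) := by
  have h' : d ∉ have_ := by simpa using hcd
  rw [runSpecB]; simp [h']

theorem A_eq_runSpecA (have_ : List String) (l : List String) :
    compress_missing_ranges_py l have_ = runSpecA have_ l := by
  generalize hn : l.length = n
  induction n using Nat.strong_induction_on generalizing l with
  | _ n ih =>
  match l, hn with
  | [], _ => simp [compress_missing_ranges_py, runSpecA, finA]
  | d :: rest, hn =>
    have hlen_rest : rest.length < n := by rw [List.length_cons] at hn; omega
    cases hcd : have_.contains d with
    | true =>
      have h1 : compress_missing_ranges_py (d :: rest) have_ = compress_missing_ranges_py rest have_ := by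
        unfold compress_missing_ranges_py
        rw [List.foldl_cons,
          show stepA have_ ([], none, none) d = ([], none, none) by
            have h' : d ∈ have_ := by simpa using hcd
            simp [stepA, h']]
      rw [h1, ih rest.length hlen_rest rest rfl, runSpecA_cons_pos have_ d rest hcd]
    | false =>
      have hmiss : ∀ x ∈ rest.takeWhile (fun x => ¬ have_.contains x), have_.contains x = false := by
        intro x hx
        have := List.mem_takeWhile_imp hx
        simpa using this
      have hsplit := List.takeWhile_append_dropWhile
        (p := fun x => (¬ have_.contains x : Bool)) (l := rest)
      have h1 : compress_missing_ranges_py (d :: rest) have_ =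
          finA ((rest.dropWhile (fun x => ¬ have_.contains x)).foldl (stepA have_)
            ([], some d, some ((rest.takeWhile (fun x => ¬ have_.contains x)).getLastD d))) := by
        unfold compress_missing_ranges_py
        conv_lhs => rw [List.foldl_cons]
        rw [show stepA have_ ([], none, none) d = ([], some d, some d) by
          have h' : d ∉ have_ := by simpa using hcd
          simp [stepA, h']]
        conv_lhs => rw [← hsplit]
        rw [List.foldl_append, foldlA_run have_ _ d d hmiss]
      rw [h1, runSpecA_cons_neg have_ d rest hcd]
      rcases hr : rest.dropWhile (fun x => ¬ have_.contains x) with _ | ⟨h, r'⟩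
      · simp [finA, pyOrOptStr, runSpecA]
      · have hh : have_.contains h = true := by
          have := dropWhile_head_false _ _ _ _ hr
          simpa using this
        have hlen : r'.length < n := by
          have h2 := List.length_dropWhile_le (fun x => decide ¬ have_.contains x = true) rest
          rw [show rest.dropWhile (fun x => decide ¬ have_.contains x = true) = h :: r' from hr] at h2
          rw [List.length_cons] at h2
          omega
        rw [List.foldl_cons,
          show stepA have_ ([], some d, some ((rest.takeWhile (fun x => ¬ have_.contains x)).getLastD d)) h
            = ([(d, pyOrOptStr (some ((rest.takeWhile (fun x => ¬ have_.contains x)).getLastD d)) d)], none, none) by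
            have h' : h ∈ have_ := by simpa using hh
            simp [stepA, h'],
          foldlA_shift, finA_append, runSpecA_cons_pos have_ h r' hh,
          ← ih r'.length hlen r' rfl]
        unfold compress_missing_ranges_py
        simp [pyOrOptStr]

-- the inner while stops exactly at the end of the current run of missing elements
theorem bScan_eq (expected have_ : List String) (i : Nat) :
    bScan expected have_ i =
      i + ((expected.drop (i + 1)).takeWhile (fun x => ¬ have_.contains x)).length := by
  fun_induction bScan with
  | case1 j h ih =>
    obtain ⟨hj, hm⟩ := h
    rw [List.drop_eq_getElem_cons hj, List.takeWhile_cons,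
      if_pos (by rw [List.getD_eq_getElem expected "" hj] at hm; simpa using hm)]
    rw [List.length_cons]
    omega
  | case2 j h =>
    by_cases hj : j + 1 < expected.length
    · have hm : have_.contains (expected.getD (j + 1) "") = true := by
        by_contra hc
        exact h ⟨hj, by simpa using hc⟩
      rw [List.getD_eq_getElem expected "" hj] at hm
      rw [List.drop_eq_getElem_cons hj, List.takeWhile_cons,
        if_neg (by simpa using hm)]
      simp
    · rw [List.drop_eq_nil_of_le (by omega)]
      simp

theorem bLoop_eq (expected have_ : List String) (i : Nat) (res : List (String × String)) :
    bLoop expected have_ i res = res ++ runSpecB have_ (expected.drop i) := by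
  fun_induction bLoop with
  | case1 i res hlt hmem ih =>
    rw [ih, List.drop_eq_getElem_cons hlt,
      runSpecB_cons_pos have_ _ _ (by rw [← List.getD_eq_getElem expected "" hlt]; exact hmem)]
  | case2 i res hlt hmem j ih =>
    have hj : j = bScan expected have_ i := rfl
    have hmem' : have_.contains (expected.getD i "") = false := by simpa using hmem
    have hs := bScan_eq expected have_ i
    have htlen : ((expected.drop (i + 1)).takeWhile (fun x => ¬ have_.contains x)).length
        ≤ expected.length - (i + 1) := by
      have := (List.takeWhile_prefix (l := expected.drop (i + 1))
        (fun x => (¬ have_.contains x : Bool))).length_le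
      rw [List.length_drop] at this
      omega
    have hgi : expected.getD i "" = expected[i]'hlt := List.getD_eq_getElem expected "" hlt
    have hgj : expected.getD j "" =
        ((expected.drop (i + 1)).takeWhile (fun x => ¬ have_.contains x)).getLastD
          (expected[i]'hlt) := by
      by_cases htne : (expected.drop (i + 1)).takeWhile (fun x => ¬ have_.contains x) = []
      · rw [hj, hs, htne]
        simpa using hgi
      · have h0 : 0 < ((expected.drop (i + 1)).takeWhile (fun x => ¬ have_.contains x)).length :=
          List.length_pos_of_ne_nil htne
        rw [hj, hs, List.getD_eq_getElem expected "" (by omega)]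
        rw [List.getLastD_eq_getLast?, List.getLast?_eq_some_getLast htne, Option.getD_some,
          List.getLast_eq_getElem htne]
        rw [(List.takeWhile_prefix (fun x => (¬ have_.contains x : Bool))).getElem (by omega)]
        rw [List.getElem_drop]
        congr 1
        omega
    have hdrop : expected.drop (j + 1) =
        (expected.drop (i + 1)).dropWhile (fun x => ¬ have_.contains x) := by
      rw [dropWhile_eq_drop, List.drop_drop, hj, hs]
      congr 1
      omega
    rw [ih, hdrop, List.drop_eq_getElem_cons hlt,
      runSpecB_cons_neg have_ _ _ (by rw [← hgi]; exact hmem'), hgi, hgj]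
    simp
  | case3 i res hge =>
    rw [List.drop_eq_nil_of_le (by omega)]
    simp [runSpecB]

theorem B_eq_runSpecB (have_ : List String) (l : List String) :
    compress_missing_ranges_py_alt l have_ = runSpecB have_ l := by
  unfold compress_missing_ranges_py_alt
  rw [bLoop_eq, List.drop_zero, List.nil_append]

-- outside the bad runs the two run recursions agree
theorem runSpecA_eq_runSpecB (have_ : List String) (l : List String)
    (h : badRunB have_ l = false) : runSpecA have_ l = runSpecB have_ l := by
  generalize hn : l.length = n
  induction n using Nat.strong_induction_on generalizing l with
  | _ n ih =>
  match l, hn with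
  | [], _ => simp [runSpecA, runSpecB]
  | d :: rest, hn =>
    have hlen_rest : rest.length < n := by rw [List.length_cons] at hn; omega
    cases hcd : have_.contains d with
    | true =>
      rw [badRunB, if_pos hcd] at h
      rw [runSpecA_cons_pos have_ d rest hcd, runSpecB_cons_pos have_ d rest hcd]
      exact ih rest.length hlen_rest rest h rfl
    | false =>
      rw [badRunB, if_neg (by rw [hcd]; exact Bool.false_ne_true), Bool.or_eq_false_iff] at h
      obtain ⟨hpair, hrec⟩ := h
      have hlen : (rest.dropWhile (fun x => ¬ have_.contains x)).length < n := by
        have := List.length_dropWhile_le (fun x => (¬ have_.contains x : Bool)) rest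
        omega
      rw [runSpecA_cons_neg have_ d rest hcd, runSpecB_cons_neg have_ d rest hcd,
        ih _ hlen _ hrec rfl]
      congr 2
      simp only [Bool.and_eq_false_iff, decide_eq_false_iff_not, not_not] at hpair
      rcases hpair with hd | hl
      · unfold pyOrStr
        split_ifs with he
        · rw [hd] at he ⊢
          exact he.symm
        · rfl
      · rw [pyOrStr, if_neg hl]

-- inside the bad runs they disagree (the first bad run yields a differing pair)
theorem runSpecA_ne_runSpecB (have_ : List String) (l : List String)
    (h : badRunB have_ l = true) : runSpecA have_ l ≠ runSpecB have_ l := by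
  generalize hn : l.length = n
  induction n using Nat.strong_induction_on generalizing l with
  | _ n ih =>
  match l, hn with
  | [], _ => simp [badRunB] at h
  | d :: rest, hn =>
    have hlen_rest : rest.length < n := by rw [List.length_cons] at hn; omega
    cases hcd : have_.contains d with
    | true =>
      rw [badRunB, if_pos hcd] at h
      rw [runSpecA_cons_pos have_ d rest hcd, runSpecB_cons_pos have_ d rest hcd]
      exact ih rest.length hlen_rest rest h rfl
    | false =>
      rw [badRunB, if_neg (by rw [hcd]; exact Bool.false_ne_true), Bool.or_eq_true_iff] at h
      rw [runSpecA_cons_neg have_ d rest hcd, runSpecB_cons_neg have_ d rest hcd]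
      rcases h with hpair | hrec
      · simp only [Bool.and_eq_true, decide_eq_true_eq] at hpair
        obtain ⟨hd, hl⟩ := hpair
        intro heq
        have := (List.cons_eq_cons.mp heq).1
        have h2 := (Prod.mk.injEq _ _ _ _).mp this
        rw [hl] at h2
        exact hd (by simpa [pyOrStr] using h2.2)
      · have hlen : (rest.dropWhile (fun x => ¬ have_.contains x)).length < n := by
          have := List.length_dropWhile_le (fun x => (¬ have_.contains x : Bool)) rest
          omega
        intro heq
        exact ih _ hlen _ hrec rfl (List.cons_eq_cons.mp heq).2

theorem getLast?_getD_cons {α : Type} (a b : α) (l : List α) :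
    (a :: l).getLast?.getD b = l.getLast?.getD a := by
  rw [← List.getLastD_eq_getLast?, ← List.getLastD_eq_getLast?, List.getLastD_cons]

-- badRunB computes exactly the run condition D_ states via splitOnP
theorem badRunB_iff (have_ : List String) (l : List String) :
    badRunB have_ l = true ↔
      ∃ r ∈ l.splitOnP (fun x => have_.contains x), r.headD "" ≠ "" ∧ r.getLastD "" = "" := by
  generalize hn : l.length = n
  induction n using Nat.strong_induction_on generalizing l with
  | _ n ih =>
  match l, hn with
  | [], _ => simp [badRunB]
  | d :: rest, hn =>
    have hlen_rest : rest.length < n := by rw [List.length_cons] at hn; omega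
    cases hcd : have_.contains d with
    | true =>
      rw [badRunB, if_pos hcd, List.splitOnP_cons, if_pos hcd]
      rw [ih rest.length hlen_rest rest rfl]
      simp
    | false =>
      rw [badRunB, if_neg (by rw [hcd]; exact Bool.false_ne_true)]
      have hmiss : ∀ x ∈ rest.takeWhile (fun x => ¬ have_.contains x), have_.contains x = false := by
        intro x hx
        have := List.mem_takeWhile_imp hx
        simpa using this
      have hsplit := List.takeWhile_append_dropWhile
        (p := fun x => (¬ have_.contains x : Bool)) (l := rest)
      rcases hr : rest.dropWhile (fun x => ¬ have_.contains x) with _ | ⟨sep, as⟩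
      · -- the whole list is one missing run
        have hall : ∀ x ∈ d :: rest, ¬ (fun x => have_.contains x) x = true := by
          intro x hx
          rcases List.mem_cons.mp hx with h | h
          · subst h; simpa using hcd
          · have : x ∈ rest.takeWhile (fun x => ¬ have_.contains x) := by
              rw [← hsplit, hr, List.append_nil] at h; exact h
            simpa using hmiss x this
        have htw : rest.takeWhile (fun x => ¬ have_.contains x) = rest := by
          conv_rhs => rw [← hsplit, hr]
          simp
        rw [List.splitOnP_eq_single (fun x => have_.contains x) (d :: rest) hall, htw]
        simp [badRunB, getLast?_getD_cons]
      · have hsep : have_.contains sep = true := by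
          have := dropWhile_head_false _ _ _ _ hr
          simpa using this
        have hlen_as : as.length < n := by
          have h2 := List.length_dropWhile_le (fun x => decide ¬ have_.contains x = true) rest
          rw [show rest.dropWhile (fun x => decide ¬ have_.contains x = true) = sep :: as from hr] at h2
          rw [List.length_cons] at h2
          omega
        have hshape : d :: rest =
            (d :: rest.takeWhile (fun x => ¬ have_.contains x)) ++ sep :: as := by
          conv_lhs => rw [← hsplit, hr]
          simp
        have hallpre : ∀ x ∈ d :: rest.takeWhile (fun x => ¬ have_.contains x),
            ¬ (fun x => have_.contains x) x = true := by
          intro x hx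
          rcases List.mem_cons.mp hx with h | h
          · subst h; simpa using hcd
          · simpa using hmiss x h
        rw [hshape, List.splitOnP_first _ _ hallpre sep hsep as]
        have hbad_dr : badRunB have_ (sep :: as) = badRunB have_ as := by
          rw [badRunB, if_pos hsep]
        rw [hbad_dr]
        rw [Bool.or_eq_true_iff, ih as.length hlen_as as rfl]
        simp [getLast?_getD_cons]

-- ===== VERDICT (by name: the statements are the Claim_ definitions above) =====
theorem compress_missing_ranges_py_spec : Claim_unchanged_compress_missing_ranges_py := by
  intro expected have_ _
  unfold Spec_compress_missing_ranges_py
  intro hnd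
  rw [A_eq_runSpecA, B_eq_runSpecB]
  refine runSpecA_eq_runSpecB have_ expected ?_
  unfold D_compress_missing_ranges_py at hnd
  rw [← badRunB_iff] at hnd
  exact Bool.eq_false_iff.mpr (fun hc => hnd hc)

theorem compress_missing_ranges_py_changed : Claim_changed_compress_missing_ranges_py := by
  unfold Claim_changed_compress_missing_ranges_py
  refine ⟨by decide, ?_, by decide, ?_, by decide⟩
  · unfold D_compress_missing_ranges_py pvDiffWitness_compress_missing_ranges_py
    decide
  · rw [show pvDiffWitness_compress_missing_ranges_py = (["a", ""], []) from rfl,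
      B_eq_runSpecB]
    simp [runSpecB, pvDiffWitnessOut_compress_missing_ranges_py]

theorem compress_missing_ranges_py_tight : Claim_exact_compress_missing_ranges_py := by
  intro expected have_ _ hd
  rw [A_eq_runSpecA, B_eq_runSpecB]
  refine runSpecA_ne_runSpecB have_ expected ?_
  unfold D_compress_missing_ranges_py at hd
  exact (badRunB_iff have_ expected).mpr hd
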